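-- pv_equiv track=rewrite | github.com/METResearchGroup/bluesky-research | services/backfill/pds_backfills/experiments/experiment_compare_serial_parallel.py | replicate_dids
-- ===== SOURCE A (Python) =====
-- from typing import Dict, List, Any, Callable
--
-- def replicate_dids(base_dids: List[str], target_count: int) -> List[str]:
--     """
--     Replicate the base DID list to reach the target count.
--
--     Args:
--         base_dids: List of base DIDs to replicate
--         target_count: Target number of DIDs
--
--     Returns:
--         Replicated list of DIDs
--     """
--     if not base_dids:
--         raise ValueError("Base DIDs list cannot be empty")
--
--     replicated_dids = []
--     while len(replicated_dids) < target_count: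
--         for did in base_dids:
--             replicated_dids.append(did)
--             if len(replicated_dids) >= target_count:
--                 break
--
--     return replicated_dids[:target_count]
-- ===== SOURCE B (Python) =====
-- def replicate_dids(base_dids, target_count):
--     if not base_dids:
--         raise ValueError("Base DIDs list cannot be empty")
--     reps = target_count // len(base_dids) + 1
--     return (base_dids * reps)[:target_count]
-- ===== Notes on version B (the rewrite author's own statement) =====
-- stated objective: idiomatic
-- what changed: Replaces the incremental while/for append loop by a closed form: multiply the base list by target_count // len(base_dids) + 1 and slice to target_count.
import Mathlib
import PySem

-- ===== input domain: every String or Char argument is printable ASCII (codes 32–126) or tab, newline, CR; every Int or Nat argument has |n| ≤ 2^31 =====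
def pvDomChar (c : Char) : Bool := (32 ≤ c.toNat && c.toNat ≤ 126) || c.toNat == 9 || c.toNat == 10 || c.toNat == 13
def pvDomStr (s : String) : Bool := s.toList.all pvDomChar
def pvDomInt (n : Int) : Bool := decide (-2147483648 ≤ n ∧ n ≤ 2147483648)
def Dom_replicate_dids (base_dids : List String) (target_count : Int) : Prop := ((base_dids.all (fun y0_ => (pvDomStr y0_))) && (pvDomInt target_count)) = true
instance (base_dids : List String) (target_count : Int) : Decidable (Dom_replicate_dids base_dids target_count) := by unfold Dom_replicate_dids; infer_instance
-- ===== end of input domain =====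

-- B replaces A's incremental while/for append loop by a closed form (list multiplication + slice); return values proved equal for nonempty base lists.

-- ===== PORT A =====
-- inner 'for did in base_dids: append; break if len >= target'
def pvInnerA (t : Int) : List String → List String → List String
  | [], acc => acc
  | d :: ds, acc =>
    let acc' := acc ++ [d]
    if t ≤ (acc'.length : Int) then acc' else pvInnerA t ds acc'

-- needed by pvLoopA's termination proof
theorem pvInnerA_length_le (t : Int) (l : List String) : ∀ acc : List String,
    acc.length ≤ (pvInnerA t l acc).length := by
  induction l with
  | nil => intro acc; simp [pvInnerA]
  | cons d ds ih =>
    intro acc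
    simp only [pvInnerA]
    split
    · simp
    · have := ih (acc ++ [d]); simp at this; omega

theorem pvInnerA_length_lt (t : Int) (base : List String) (acc : List String)
    (hb : base ≠ []) : acc.length < (pvInnerA t base acc).length := by
  cases base with
  | nil => exact absurd rfl hb
  | cons d ds =>
    simp only [pvInnerA]
    split
    · simp
    · have := pvInnerA_length_le t ds (acc ++ [d]); simp at this; omega

-- 'while len(replicated_dids) < target_count: for did in base_dids: …'
-- (the 'base ≠ []' conjunct only makes the loop total; A raises before the loop when base is empty)
def pvLoopA (base : List String) (t : Int) (acc : List String) : List String :=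
  if h : (acc.length : Int) < t ∧ base ≠ [] then
    pvLoopA base t (pvInnerA t base acc)
  else acc
termination_by (t - acc.length).toNat
decreasing_by
  have := pvInnerA_length_lt t base acc h.2
  omega

def replicate_dids (base_dids : List String) (target_count : Int) : List String :=
  if base_dids = [] then []  -- Python raises ValueError here; excluded by Pre_
  else PySem.List.slice (pvLoopA base_dids target_count []) none (some target_count)

-- ===== PORT B =====
def replicate_dids_alt (base_dids : List String) (target_count : Int) : List String :=
  if base_dids = [] then []  -- Python raises ValueError here; excluded by Pre_
  else
    -- reps = target_count // len(base_dids) + 1; base_dids * reps (empty for reps ≤ 0), then [:target_count]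
    PySem.List.slice
      (List.flatten (List.replicate (PySem.Int.floordiv target_count (base_dids.length : Int) + 1).toNat base_dids))
      none (some target_count)

-- ===== PRECONDITION & SPEC =====
-- Pre_ excludes only the empty base list, on which Python A raises ValueError.
def Pre_replicate_dids (base_dids : List String) (target_count : Int) : Prop := base_dids ≠ []
instance (base_dids : List String) (target_count : Int) : Decidable (Pre_replicate_dids base_dids target_count) := by unfold Pre_replicate_dids; infer_instance
def pvWitness_replicate_dids : List String × Int := (["did:a", "did:b"], 5)

def Spec_replicate_dids (base_dids : List String) (target_count : Int) (out : List String) : Prop := out = replicate_dids_alt base_dids target_count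
instance (base_dids : List String) (target_count : Int) (out : List String) : Decidable (Spec_replicate_dids base_dids target_count out) := by unfold Spec_replicate_dids; infer_instance

-- ===== CLAIM (what is proved, stated in full; the proofs are below) =====
def Claim_equal_replicate_dids : Prop := ∀ (base_dids : List String) (target_count : Int), Dom_replicate_dids base_dids target_count → Pre_replicate_dids base_dids target_count → Spec_replicate_dids base_dids target_count (replicate_dids base_dids target_count)

-- ===== LEMMAS AND PROOFS =====

-- m concatenated copies of base (Python's base * m for m ≥ 0)
def pvFlat (m : Nat) (base : List String) : List String := List.flatten (List.replicate m base)

theorem pvFlat_length (m : Nat) (base : List String) : (pvFlat m base).length = m * base.length := by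
  simp [pvFlat, List.length_flatten]

theorem pvFlat_succ_right (m : Nat) (base : List String) :
    pvFlat (m + 1) base = pvFlat m base ++ base := by
  simp [pvFlat, List.replicate_succ']

theorem pvFlat_succ_left (m : Nat) (base : List String) :
    pvFlat (m + 1) base = base ++ pvFlat m base := by
  simp [pvFlat, List.replicate_succ]

theorem take_pvFlat_stab (n m : Nat) (base : List String) (h : n ≤ m * base.length) :
    (pvFlat (m + 1) base).take n = (pvFlat m base).take n := by
  rw [pvFlat_succ_right, List.take_append_of_le_length (by rw [pvFlat_length]; exact h)]

theorem take_pvFlat_add (n m d : Nat) (base : List String) (h : n ≤ m * base.length) :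
    (pvFlat (m + d) base).take n = (pvFlat m base).take n := by
  induction d with
  | zero => rfl
  | succ d ih =>
    have : n ≤ (m + d) * base.length :=
      le_trans h (Nat.mul_le_mul_right _ (Nat.le_add_right _ _))
    rw [show m + (d + 1) = (m + d) + 1 by ring, take_pvFlat_stab n (m + d) base this, ih]

theorem take_pvFlat_eq (n j k : Nat) (base : List String)
    (hj : n ≤ j * base.length) (hk : n ≤ k * base.length) :
    (pvFlat j base).take n = (pvFlat k base).take n := by
  rcases le_total j k with h | h
  · rw [show k = j + (k - j) by omega, take_pvFlat_add n j (k - j) base hj]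
  · rw [show j = k + (j - k) by omega, take_pvFlat_add n k (j - k) base hk]

-- the first n elements of the infinite repetition of base
def pvCyc (n : Nat) (base : List String) : List String := (pvFlat n base).take n

theorem pvCyc_length (n : Nat) (base : List String) (hb : base ≠ []) :
    (pvCyc n base).length = n := by
  have hL : 1 ≤ base.length := List.length_pos_of_ne_nil hb
  simp [pvCyc, pvFlat_length]
  exact Nat.le_mul_of_pos_right n (by omega)

theorem pvCyc_small (n : Nat) (base : List String) (hb : base ≠ []) (h : n ≤ base.length) :
    pvCyc n base = base.take n := by
  have hL : 1 ≤ base.length := List.length_pos_of_ne_nil hb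
  have : pvCyc n base = (pvFlat 1 base).take n := by
    apply take_pvFlat_eq
    · exact Nat.le_mul_of_pos_right n (by omega)
    · simpa using h
  simpa [pvFlat] using this

theorem pvCyc_big (n : Nat) (base : List String) (hb : base ≠ []) (h : base.length < n) :
    pvCyc n base = base ++ pvCyc (n - base.length) base := by
  have hL : 1 ≤ base.length := List.length_pos_of_ne_nil hb
  have h1 : pvCyc n base = (pvFlat ((n - base.length) + 1) base).take n := by
    apply take_pvFlat_eq
    · exact Nat.le_mul_of_pos_right n (by omega)
    · have e : (n - base.length + 1) * base.length
          = (n - base.length) * base.length + base.length := by ring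
      have : n - base.length ≤ (n - base.length) * base.length :=
        Nat.le_mul_of_pos_right _ (by omega)
      omega
  rw [h1, pvFlat_succ_left, List.take_append]
  have hbase : base.take n = base := List.take_of_length_le (by omega)
  rw [hbase]
  rfl

theorem pvInnerA_eq (t : Int) (l : List String) : ∀ acc : List String,
    (acc.length : Int) < t →
    pvInnerA t l acc = acc ++ l.take (min l.length (t - acc.length).toNat) := by
  induction l with
  | nil => intro acc _; simp [pvInnerA]
  | cons d ds ih =>
    intro acc hlt
    simp only [pvInnerA]
    split
    · rename_i hge
      have : min (d :: ds).length (t - acc.length).toNat = 1 := by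
        simp at hge ⊢; omega
      rw [this]; simp
    · rename_i hngt
      have h2 : ((acc ++ [d]).length : Int) < t := by simp at hngt ⊢; omega
      rw [ih (acc ++ [d]) h2]
      have hk : min (d :: ds).length (t - acc.length).toNat
          = min ds.length (t - ((acc ++ [d]).length : Int)).toNat + 1 := by
        simp at hngt ⊢; omega
      rw [hk]
      simp [List.take_succ_cons]

theorem pvLoopA_eq (base : List String) (t : Int) (hb : base ≠ []) :
    ∀ n : Nat, ∀ acc : List String, n = (t - acc.length).toNat → (acc.length : Int) < t →
    pvLoopA base t acc = acc ++ pvCyc n base := by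
  intro n
  induction n using Nat.strong_induction_on with
  | _ n ih =>
    intro acc hn hlt
    have hL : 1 ≤ base.length := List.length_pos_of_ne_nil hb
    have hn1 : 1 ≤ n := by omega
    rw [pvLoopA]
    rw [dif_pos ⟨hlt, hb⟩]
    rw [pvInnerA_eq t base acc hlt]
    by_cases hcase : n ≤ base.length
    · -- the inner loop reaches the target exactly
      have hmin : min base.length (t - acc.length).toNat = n := by omega
      rw [hn] at hmin ⊢
      rw [hmin]
      rw [pvLoopA]
      rw [dif_neg]
      · rw [pvCyc_small _ base hb (by omega)]
      · intro hcontra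
        have := hcontra.1
        simp at this
        omega
    · -- a full copy of base is appended; recurse
      have hmin : min base.length (t - acc.length).toNat = base.length := by omega
      rw [hmin, List.take_length]
      have hlen : ((acc ++ base).length : Int) < t := by simp; omega
      have hrec := ih (n - base.length) (by omega) (acc ++ base) (by simp; omega) hlen
      rw [hrec, pvCyc_big n base hb (by omega)]
      simp

-- ===== VERDICT (by name: the statement is the Claim_ definition above) =====
theorem replicate_dids_spec : Claim_equal_replicate_dids := by
  intro base t _ hPre
  unfold Pre_replicate_dids at hPre
  unfold Spec_replicate_dids replicate_dids replicate_dids_alt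
  rw [if_neg hPre, if_neg hPre]
  have hL : 1 ≤ base.length := List.length_pos_of_ne_nil hPre
  by_cases ht : t ≤ 0
  · -- target_count ≤ 0: both sides are []
    rw [pvLoopA, dif_neg (by simp; omega)]
    by_cases ht0 : t = 0
    · subst ht0
      rw [show PySem.Int.floordiv 0 (base.length : Int) + 1 = (1:Int) by
        rw [PySem.Int.floordiv_eq_ediv_of_pos (by omega)]; simp]
      simp [PySem.List.slice, PySem.List.clampIdx]
    · have hneg : t / (base.length : Int) < 0 := Int.ediv_neg_of_neg_of_pos (by omega) (by omega)
      rw [PySem.Int.floordiv_eq_ediv_of_pos (by omega : (0:Int) < (base.length : Int))]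
      rw [show (t / (base.length : Int) + 1).toNat = 0 by omega]
      simp [PySem.List.slice, PySem.List.clampIdx]
  · -- target_count > 0
    have ht' : 0 < t := by omega
    obtain ⟨m, hm⟩ : ∃ m : Nat, t = (m : Int) := ⟨t.toNat, (Int.toNat_of_nonneg (le_of_lt ht')).symm⟩
    subst hm
    have hA : pvLoopA base (m : Int) [] = pvCyc m base := by
      have := pvLoopA_eq base (m : Int) hPre m [] (by simp) (by simpa using ht')
      simpa using this
    rw [hA, PySem.List.slice_to_natCast, PySem.List.slice_to_natCast]
    rw [List.take_of_length_le (by rw [pvCyc_length m base hPre])]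
    rw [PySem.Int.floordiv_natCast]
    rw [show ((((m / base.length : Nat)) : Int) + 1).toNat = m / base.length + 1 by generalize m / base.length = q; omega]
    have h1 : m ≤ m * base.length := Nat.le_mul_of_pos_right m (by omega)
    have h2 : m ≤ (m / base.length + 1) * base.length := by
      have := Nat.div_add_mod m base.length
      have := Nat.mod_lt m (show 0 < base.length by omega)
      nlinarith [Nat.div_mul_le_self m base.length]
    exact take_pvFlat_eq m m (m / base.length + 1) base h1 h2
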